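-- pv_equiv track=rewrite | github.com/nokia-wroclaw/innovativeproject-loancalculator | backend/server/calculator.py | format_monthly_payment
-- ===== SOURCE A (Python) =====
-- MONTHS_IN_YEAR = 12
--
-- def format_monthly_payment(monthly_payment):
--
--     formatted_payment = {}
--     current_year_list = []
--     current_year = 1
--
--     for count, value in enumerate(monthly_payment):
--         current_year_list.append(value)
--         if count % MONTHS_IN_YEAR == 11:
--             formatted_payment[f"year_{current_year}"] = current_year_list
--             current_year = current_year + 1
--             current_year_list = []
--     if len(monthly_payment) % MONTHS_IN_YEAR != 0:
--          formatted_payment[f"year_{current_year}"] = current_year_list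
--     return formatted_payment
-- ===== SOURCE B (Python) =====
-- MONTHS_IN_YEAR = 12
--
-- def format_monthly_payment(monthly_payment):
--     num_years = (len(monthly_payment) + MONTHS_IN_YEAR - 1) // MONTHS_IN_YEAR
--     return {f"year_{i + 1}": monthly_payment[i * MONTHS_IN_YEAR:(i + 1) * MONTHS_IN_YEAR]
--             for i in range(num_years)}
-- ===== Notes on version B (the rewrite author's own statement) =====
-- stated objective: simpler
-- what changed: Replaces the element-by-element counter/modulo accumulation with separate tail flush by a dict comprehension that slices the list into 12-month chunks over ceil(len/12) year indices.
import Mathlib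
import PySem

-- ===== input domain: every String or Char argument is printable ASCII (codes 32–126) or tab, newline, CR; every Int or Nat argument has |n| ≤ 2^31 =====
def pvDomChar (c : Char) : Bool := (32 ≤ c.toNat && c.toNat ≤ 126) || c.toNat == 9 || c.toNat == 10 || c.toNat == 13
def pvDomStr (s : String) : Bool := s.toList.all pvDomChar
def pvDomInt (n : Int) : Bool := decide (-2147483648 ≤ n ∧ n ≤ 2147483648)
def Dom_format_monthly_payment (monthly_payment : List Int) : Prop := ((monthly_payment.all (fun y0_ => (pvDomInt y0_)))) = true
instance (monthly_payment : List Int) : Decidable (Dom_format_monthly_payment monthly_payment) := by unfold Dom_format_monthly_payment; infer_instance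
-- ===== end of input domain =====

-- B groups the payments by slicing 12-month chunks (a dict comprehension over ceil(len/12) years)
-- instead of A's per-element counter/modulo accumulation with a separate tail flush; same cost, simpler.

-- ===== PORT A =====
-- A-side helper: the body of A's for-loop; state = (formatted_payment, current_year_list, current_year).
-- Python's dict here only ever assigns a FRESH key ("year_{current_year}" with current_year strictly
-- increasing), so the dict-in-insertion-order is ported exactly as an assoc list extended by append.
def fmpStep (st : List (String × List Int) × List Int × Int) (cv : Int × Int) :
    List (String × List Int) × List Int × Int :=
  let cyl := st.2.1 ++ [cv.2]
  if PySem.Int.mod cv.1 12 == 11 then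
    (st.1 ++ [("year_" ++ PySem.Int.toStr st.2.2, cyl)], ([] : List Int), st.2.2 + 1)
  else (st.1, cyl, st.2.2)

def format_monthly_payment (monthly_payment : List Int) : List (String × List Int) :=
  -- MONTHS_IN_YEAR = 12
  let st := (PySem.List.enumerate monthly_payment 0).foldl fmpStep
    (([] : List (String × List Int)), ([] : List Int), (1 : Int))
  if PySem.Int.mod ((monthly_payment.length : Int)) 12 != 0 then
    st.1 ++ [("year_" ++ PySem.Int.toStr st.2.2, st.2.1)]
  else st.1

-- ===== PORT B =====
-- Source B: num_years = (len + 12 - 1) // 12; dict comprehension {f"year_{i+1}": mp[i*12:(i+1)*12]}.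
-- Every comprehension key is distinct, so the dict is the list of pairs in iteration order.
def format_monthly_payment_alt (monthly_payment : List Int) : List (String × List Int) :=
  let numYears := PySem.Int.floordiv ((monthly_payment.length : Int) + 12 - 1) 12
  (PySem.List.pyRange 0 numYears 1).map
    (fun i => ("year_" ++ PySem.Int.toStr (i + 1),
               PySem.List.slice monthly_payment (some (i * 12)) (some ((i + 1) * 12))))

-- ===== PRECONDITION & SPEC =====
def Spec_format_monthly_payment (monthly_payment : List Int) (out : List (String × List Int)) : Prop := out = format_monthly_payment_alt monthly_payment
instance (monthly_payment : List Int) (out : List (String × List Int)) : Decidable (Spec_format_monthly_payment monthly_payment out) := by unfold Spec_format_monthly_payment; infer_instance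

-- ===== CLAIM (what is proved, stated in full; the proofs are below) =====
def Claim_equal_format_monthly_payment : Prop := ∀ (monthly_payment : List Int), Dom_format_monthly_payment monthly_payment → Spec_format_monthly_payment monthly_payment (format_monthly_payment monthly_payment)

-- ===== LEMMAS AND PROOFS =====

-- Common shape both programs produce: successive 12-chunks labelled year_y, year_{y+1}, …
def chunkGo (mp : List Int) (y : Int) : List (String × List Int) :=
  if h : mp = [] then []
  else ("year_" ++ PySem.Int.toStr y, mp.take 12) :: chunkGo (mp.drop 12) (y + 1)
termination_by mp.length
decreasing_by
  cases mp with
  | nil => exact absurd rfl h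
  | cons a t => simp only [List.length_drop, List.length_cons]; omega

theorem mod12_cast (n : Nat) : PySem.Int.mod (n : Int) 12 = ((n % 12 : Nat) : Int) := by
  exact_mod_cast PySem.Int.mod_natCast n 12

theorem mod12_add (j k : Nat) (hk : k < 12) :
    PySem.Int.mod (12 * (j : Int) + (k : Int)) 12 = (k : Int) := by
  rw [PySem.Int.mod_eq_emod_of_pos (by norm_num : (0:Int) < 12)]
  omega

-- A's loop over a stretch of elements none of which lands on count % 12 == 11 just accumulates them.
theorem foldA_noTrigger (t : List Int) (c : Int)
    (fp : List (String × List Int)) (cur : List Int) (y : Int)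
    (h : ∀ p ∈ PySem.List.enumerate t c, PySem.Int.mod p.1 12 ≠ 11) :
    (PySem.List.enumerate t c).foldl fmpStep (fp, cur, y) = (fp, cur ++ t, y) := by
  induction t generalizing c cur with
  | nil => simp [PySem.List.enumerate_nil]
  | cons a t ih =>
      rw [PySem.List.enumerate_cons]
      have hc : PySem.Int.mod c 12 ≠ 11 :=
        h (c, a) (by rw [PySem.List.enumerate_cons]; exact List.mem_cons_self)
      simp only [List.foldl_cons, fmpStep]
      rw [if_neg (by simpa using hc)]
      rw [ih (c + 1) (cur ++ [a])
        (fun p hp => h p (by rw [PySem.List.enumerate_cons]; exact List.mem_cons_of_mem _ hp))]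
      simp

-- A's loop with the tail flush, started at count 12*j (any j) with any accumulated dict, is chunkGo.
theorem A_loop (n : Nat) : ∀ (mp : List Int), mp.length = n →
    ∀ (j : Nat) (y : Int) (fp : List (String × List Int)),
    (if PySem.Int.mod ((mp.length : Int)) 12 != 0 then
       ((PySem.List.enumerate mp (12 * (j : Int))).foldl fmpStep (fp, ([] : List Int), y)).1
         ++ [("year_" ++ PySem.Int.toStr ((PySem.List.enumerate mp (12 * (j : Int))).foldl fmpStep (fp, ([] : List Int), y)).2.2,
              ((PySem.List.enumerate mp (12 * (j : Int))).foldl fmpStep (fp, ([] : List Int), y)).2.1)]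
     else ((PySem.List.enumerate mp (12 * (j : Int))).foldl fmpStep (fp, ([] : List Int), y)).1)
    = fp ++ chunkGo mp y := by
  induction n using Nat.strong_induction_on with
  | _ n ih =>
    intro mp hn j y fp
    by_cases hlt : mp.length < 12
    · -- fewer than 12 remaining: the trigger never fires
      have hnt : (PySem.List.enumerate mp (12 * (j : Int))).foldl fmpStep (fp, ([] : List Int), y)
          = (fp, [] ++ mp, y) := by
        apply foldA_noTrigger
        intro p hp
        rw [PySem.List.mem_enumerate_iff] at hp
        obtain ⟨k, hk, rfl⟩ := hp
        rw [mod12_add j k (by omega)]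
        intro hck
        have : k = 11 := by exact_mod_cast hck
        omega
      cases mp with
      | nil =>
          rw [hnt, mod12_cast]
          rw [chunkGo]
          simp
      | cons a t =>
          have hne : (a :: t) ≠ [] := by simp
          rw [hnt, mod12_cast]
          have h1 : (a :: t).length % 12 = (a :: t).length := Nat.mod_eq_of_lt hlt
          rw [h1]
          rw [if_pos (by simp; omega)]
          rw [chunkGo, dif_neg hne]
          have htake : (a :: t).take 12 = a :: t := List.take_of_length_le (by omega)
          have hdrop : (a :: t).drop 12 = [] := List.drop_of_length_le (by omega)
          rw [htake, hdrop, chunkGo]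
          simp
    · -- at least 12 remaining: the first 12 elements form one chunk, recurse on the rest
      rw [not_lt] at hlt
      obtain ⟨t, r, htr, ht⟩ : ∃ t r, mp = t ++ r ∧ t.length = 12 :=
        ⟨mp.take 12, mp.drop 12, (List.take_append_drop 12 mp).symm, List.length_take_of_le hlt⟩
      -- split off the last element of the 12-chunk
      rcases List.eq_nil_or_concat t with rfl | ⟨t', a, hta⟩
      · simp at ht
      rw [List.concat_eq_append] at hta
      subst hta
      have ht' : t'.length = 11 := by simpa using ht
      subst htr
      have henum : PySem.List.enumerate ((t' ++ [a]) ++ r) (12 * (j : Int))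
          = (PySem.List.enumerate t' (12 * (j : Int)) ++ [(12 * (j : Int) + 11, a)])
            ++ PySem.List.enumerate r (12 * (((j + 1 : Nat)) : Int)) := by
        rw [PySem.List.enumerate_append, PySem.List.enumerate_append]
        rw [PySem.List.enumerate_cons, PySem.List.enumerate_nil]
        rw [ht']
        rw [List.length_append, ht']
        norm_num
        congr 1
      rw [henum]
      rw [List.foldl_append, List.foldl_append]
      rw [foldA_noTrigger t' (12 * (j : Int)) fp [] y ?side]
      case side =>
        intro p hp
        rw [PySem.List.mem_enumerate_iff] at hp
        obtain ⟨k, hk, rfl⟩ := hp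
        rw [mod12_add j k (by omega)]
        intro hck
        have : k = 11 := by exact_mod_cast hck
        omega
      have hstep : fmpStep (fp, [] ++ t', y) (12 * (j : Int) + 11, a)
          = (fp ++ [("year_" ++ PySem.Int.toStr y, t' ++ [a])], ([] : List Int), y + 1) := by
        have hm : PySem.Int.mod (12 * (j : Int) + 11) 12 = 11 := by
          have := mod12_add j 11 (by omega); exact_mod_cast this
        simp only [fmpStep, hm]
        simp
      rw [List.foldl_cons, List.foldl_nil, hstep]
      have hlen : ((t' ++ [a]) ++ r).length = r.length + 12 := by
        simp [ht']
        omega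
      have hmodeq : PySem.Int.mod ((((t' ++ [a]) ++ r).length : Int)) 12
          = PySem.Int.mod ((r.length : Int)) 12 := by
        rw [mod12_cast, mod12_cast, hlen]
        congr 1
        omega
      rw [hmodeq]
      have hrec := ih r.length (by rw [← hn, hlen]; omega) r rfl (j + 1) (y + 1)
        (fp ++ [("year_" ++ PySem.Int.toStr y, t' ++ [a])])
      rw [hrec]
      conv_rhs => rw [chunkGo]
      rw [dif_neg (by simp : ¬ (t' ++ [a] ++ r = []))]
      have htk : ((t' ++ [a]) ++ r).take 12 = t' ++ [a] := by
        rw [List.take_append_of_le_length (by simp [ht'])]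
        exact List.take_of_length_le (by simp [ht'])
      have hdr : ((t' ++ [a]) ++ r).drop 12 = r := by
        rw [List.drop_append_of_le_length (by simp [ht'])]
        simp [List.drop_of_length_le, ht']
      rw [htk, hdr]
      simp

-- B's comprehension, written over List.range with an arbitrary starting year, is chunkGo.
theorem B_go (n : Nat) : ∀ (mp : List Int), mp.length = n → ∀ (y : Int),
    (List.range ((mp.length + 11) / 12)).map
      (fun (i : Nat) => ("year_" ++ PySem.Int.toStr (y + (i : Int)), (mp.drop (12 * i)).take 12))
    = chunkGo mp y := by
  induction n using Nat.strong_induction_on with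
  | _ n ih =>
    intro mp hn y
    cases mp with
    | nil => rw [chunkGo]; simp
    | cons a t =>
      have hne : (a :: t) ≠ [] := by simp
      rw [chunkGo, dif_neg hne]
      have hN : ((a :: t).length + 11) / 12 = (((a :: t).drop 12).length + 11) / 12 + 1 := by
        simp only [List.length_cons, List.length_drop]
        omega
      rw [hN, List.range_succ_eq_map, List.map_cons]
      simp only [Nat.cast_zero, add_zero, Nat.mul_zero, List.drop_zero]
      congr 1
      rw [List.map_map]
      have hrec := ih ((a :: t).drop 12).length (by simp [List.length_drop] at *; omega)
        ((a :: t).drop 12) rfl (y + 1)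
      rw [← hrec]
      apply List.map_congr_left
      intro i _
      simp only [Function.comp_apply, Prod.mk.injEq]
      constructor
      · congr 2
        push_cast
        ring
      · rw [List.drop_drop]
        congr 2
        omega

-- ===== VERDICT (by name: the statement is the Claim_ definition above) =====
theorem format_monthly_payment_spec : Claim_equal_format_monthly_payment := by
  intro mp _
  unfold Spec_format_monthly_payment
  have hA := A_loop mp.length mp rfl 0 1 []
  simp only [Nat.cast_zero, mul_zero, List.nil_append] at hA
  unfold format_monthly_payment
  have hB : format_monthly_payment_alt mp = chunkGo mp 1 := by
    show (PySem.List.pyRange 0 (PySem.Int.floordiv ((mp.length : Int) + 12 - 1) 12) 1).map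
      (fun i => ("year_" ++ PySem.Int.toStr (i + 1),
                 PySem.List.slice mp (some (i * 12)) (some ((i + 1) * 12)))) = chunkGo mp 1
    have hNcast : PySem.Int.floordiv ((mp.length : Int) + 12 - 1) 12
        = (((mp.length + 11) / 12 : Nat) : Int) := by
      have h1 : ((mp.length : Int) + 12 - 1) = (((mp.length + 11 : Nat)) : Int) := by push_cast; ring
      rw [h1]
      exact_mod_cast PySem.Int.floordiv_natCast (mp.length + 11) 12
    rw [hNcast, PySem.List.pyRange_zero_natCast, List.map_map]
    rw [← B_go mp.length mp rfl 1]
    apply List.map_congr_left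
    intro i hi
    simp only [Function.comp_apply, Prod.mk.injEq]
    constructor
    · congr 2
      ring
    · have h2 : ((i : Int)) * 12 = (((i * 12 : Nat)) : Int) := by push_cast; ring
      have h3 : ((i : Int) + 1) * 12 = (((i * 12 : Nat)) : Int) + (((12 : Nat)) : Int) := by push_cast; ring
      rw [h2, h3, PySem.List.slice_natCast_add]
      congr 2
      omega
  rw [hB, ← hA]
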